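-- pv_equiv track=rewrite | github.com/weesiau/numberbases | decoct.py | decimal_octal
-- ===== SOURCE A (Python) =====
-- def decimal_octal(dec):
--     num = int(dec)
--     octal = []
--     while (num > 0):
--         rem = num % 8
--         octal.append(str(rem))
--         num = num // 8
--     octal.reverse()
--     return(''.join(octal))
-- ===== SOURCE B (Python) =====
-- def decimal_octal(dec):
--     def helper(n):
--         if n <= 0:
--             return ''
--         return helper(n // 8) + str(n % 8)
--     num = int(dec)
--     return helper(num)
-- ===== Notes on version B (the rewrite author's own statement) =====
-- stated objective: simpler
-- what changed: Replaces the append-then-reverse-then-join loop over a digit list with a direct recursion whose call stack yields the digits most-significant first, so no list, reverse or join is needed.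
import Mathlib
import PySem

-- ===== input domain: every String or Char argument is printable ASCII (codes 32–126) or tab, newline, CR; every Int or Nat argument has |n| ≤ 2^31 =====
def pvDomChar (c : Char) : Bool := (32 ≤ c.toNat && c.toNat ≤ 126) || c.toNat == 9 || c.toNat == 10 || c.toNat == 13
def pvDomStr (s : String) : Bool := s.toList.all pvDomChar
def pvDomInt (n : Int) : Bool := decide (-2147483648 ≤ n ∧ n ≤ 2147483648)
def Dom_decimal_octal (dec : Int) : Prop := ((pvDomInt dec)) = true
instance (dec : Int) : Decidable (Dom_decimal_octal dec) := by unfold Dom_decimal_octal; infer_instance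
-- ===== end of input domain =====

-- B replaces A's append-then-reverse-then-join digit list with a direct recursion whose
-- call stack emits the octal digits most-significant first (objective: simpler).


-- ===== PORT A =====
-- the while loop: num > 0 → append str(num % 8), num = num // 8
def decOctLoopA (num : Int) (octal : List String) : List String :=
  if _h : num > 0 then
    decOctLoopA (PySem.Int.floordiv num 8) (octal ++ [PySem.Int.toStr (PySem.Int.mod num 8)])
  else octal
termination_by num.toNat
decreasing_by
  rw [PySem.Int.floordiv_eq_ediv_of_pos (by norm_num)]
  omega

def decimal_octal (dec : Int) : String :=
  -- num = int(dec) is the identity on an Int argument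
  PySem.Str.join "" ((decOctLoopA dec []).reverse)

-- ===== PORT B =====
def decOctHelperB (n : Int) : String :=
  if _h : n ≤ 0 then ""
  else decOctHelperB (PySem.Int.floordiv n 8) ++ PySem.Int.toStr (PySem.Int.mod n 8)
termination_by n.toNat
decreasing_by
  rw [PySem.Int.floordiv_eq_ediv_of_pos (by norm_num)]
  omega

def decimal_octal_alt (dec : Int) : String :=
  decOctHelperB dec

-- ===== PRECONDITION & SPEC =====
def Spec_decimal_octal (dec : Int) (out : String) : Prop := out = decimal_octal_alt dec
instance (dec : Int) (out : String) : Decidable (Spec_decimal_octal dec out) := by unfold Spec_decimal_octal; infer_instance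

-- ===== CLAIM (what is proved, stated in full; the proofs are below) =====
def Claim_equal_decimal_octal : Prop := ∀ (dec : Int), Dom_decimal_octal dec → Spec_decimal_octal dec (decimal_octal dec)

-- ===== LEMMAS AND PROOFS =====

-- joining with "" concatenates the character lists
theorem flatten_intersperse_nil : ∀ (l : List (List Char)),
    (List.intersperse ([] : List Char) l).flatten = l.flatten
  | [] => rfl
  | [_] => rfl
  | a :: b :: l => by
      simp [List.intersperse, flatten_intersperse_nil (b :: l)]

theorem joinNil (l : List (List Char)) : PySem.Chars.join [] l = l.flatten := by
  simp [PySem.Chars.join, List.intercalate, flatten_intersperse_nil]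

theorem key (k : Nat) : ∀ (num : Int), num.toNat = k → ∀ (acc : List String),
    (PySem.Str.join "" ((decOctLoopA num acc).reverse)).toList
      = (decOctHelperB num).toList ++ (PySem.Str.join "" acc.reverse).toList := by
  induction k using Nat.strong_induction_on with
  | _ k ih =>
    intro num hk acc
    rw [decOctLoopA, decOctHelperB]
    split_ifs with h h' h'
    · omega
    · have hlt : (PySem.Int.floordiv num 8).toNat < k := by
        rw [PySem.Int.floordiv_eq_ediv_of_pos (by norm_num)]; omega
      rw [ih _ hlt _ rfl]
      simp [joinNil]
    · simp
    · omega



-- ===== VERDICT (by name: the statement is the Claim_ definition above) =====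
theorem decimal_octal_spec : Claim_equal_decimal_octal := by
  intro dec _
  unfold Spec_decimal_octal decimal_octal decimal_octal_alt
  apply String.toList_inj.mp
  have := key dec.toNat dec rfl []
  simpa [joinNil] using this
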